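-- pv_equiv track=rewrite | github.com/0xCAF2/calcium-lang | script/testfile/def.py | f
-- ===== SOURCE A (Python) =====
-- def f(x, y):
--     n = 0
--     while n < 10:
--         if n > x:
--             return x * 7
--         elif n > y:
--             return y * 10
--         n += 1
-- ===== SOURCE B (Python) =====
-- def f(x, y):
--     m = min(x, y)
--     n0 = max(0, m + 1)  # first n the loop would stop at
--     if n0 >= 10:
--         return None
--     elif n0 > x:
--         return x * 7
--     else:
--         return y * 10
-- ===== Notes on version B (the rewrite author's own statement) =====
-- stated objective: simpler
-- what changed: Replaces the 0..9 counting loop with a closed-form computation of the first index n0 = max(0, min(x,y)+1) at which the loop would stop, then a single three-way branch.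
import Mathlib
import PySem

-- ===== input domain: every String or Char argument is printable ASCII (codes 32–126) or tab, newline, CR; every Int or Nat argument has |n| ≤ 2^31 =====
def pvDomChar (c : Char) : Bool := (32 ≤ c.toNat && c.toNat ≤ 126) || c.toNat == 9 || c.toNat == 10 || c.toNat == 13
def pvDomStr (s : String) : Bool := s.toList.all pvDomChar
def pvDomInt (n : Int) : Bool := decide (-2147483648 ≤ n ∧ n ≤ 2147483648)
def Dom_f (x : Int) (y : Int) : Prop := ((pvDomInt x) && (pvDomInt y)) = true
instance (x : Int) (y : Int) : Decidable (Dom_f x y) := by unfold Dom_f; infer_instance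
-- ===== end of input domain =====

-- B replaces A's counting loop with a closed-form computation of the loop's stopping index (objective: simpler).

-- ===== PORT A =====
-- literal port of A's while loop: n counts 0,1,2,… while n < 10; falling off the loop returns None
def fLoop (x : Int) (y : Int) (n : Nat) : Option Int :=
  if n < 10 then
    if (n : Int) > x then some (x * 7)
    else if (n : Int) > y then some (y * 10)
    else fLoop x y (n + 1)
  else none

def f (x : Int) (y : Int) : Option Int := fLoop x y 0

-- ===== PORT B =====
def f_alt (x : Int) (y : Int) : Option Int :=
  let m := min x y
  let n0 := max 0 (m + 1)
  if n0 ≥ 10 then none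
  else if n0 > x then some (x * 7)
  else some (y * 10)

-- ===== PRECONDITION & SPEC =====
def Spec_f (x : Int) (y : Int) (out : Option Int) : Prop := out = f_alt x y
instance (x : Int) (y : Int) (out : Option Int) : Decidable (Spec_f x y out) := by unfold Spec_f; infer_instance

-- ===== CLAIM (what is proved, stated in full; the proofs are below) =====
def Claim_equal_f : Prop := ∀ (x : Int) (y : Int), Dom_f x y → Spec_f x y (f x y)

-- ===== LEMMAS AND PROOFS =====

-- closed form of the loop from an arbitrary start index n (proof-only helper)
def gAux (x : Int) (y : Int) (n : Nat) : Option Int :=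
  let s := max (n : Int) (min x y + 1)
  if s ≥ 10 then none else if s > x then some (x * 7) else some (y * 10)

theorem fLoop_eq_gAux (x : Int) (y : Int) :
    ∀ (j n : Nat), 10 ≤ n + j → fLoop x y n = gAux x y n := by
  intro j
  induction j with
  | zero =>
      intro n hn
      rw [fLoop, if_neg (by omega)]
      simp only [gAux]
      rw [if_pos (by omega)]
  | succ j ih =>
      intro n hn
      rw [fLoop]
      by_cases h10 : n < 10
      · rw [if_pos h10]
        by_cases hx : (n : Int) > x
        · rw [if_pos hx]
          simp only [gAux]
          rw [if_neg (by omega), if_pos (by omega)]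
        · rw [if_neg hx]
          by_cases hy : (n : Int) > y
          · rw [if_pos hy]
            simp only [gAux]
            rw [if_neg (by omega), if_neg (by omega)]
          · rw [if_neg hy, ih (n + 1) (by omega)]
            simp only [gAux]
            have hc : ((n + 1 : Nat) : Int) = (n : Int) + 1 := by push_cast; ring
            rw [hc]
            split_ifs <;> first | rfl | (exfalso; omega)
      · rw [if_neg h10]
        simp only [gAux]
        rw [if_pos (by omega)]

-- ===== VERDICT (by name: the statement is the Claim_ definition above) =====
theorem f_spec : Claim_equal_f := by
  intro x y _
  unfold Spec_f f
  rw [fLoop_eq_gAux x y 10 0 (by omega)]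
  simp only [gAux, f_alt, Nat.cast_zero]
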